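-- pv_equiv track=rewrite | github.com/vikas965/DSA | practice/day1.py | LargeSmallSum
-- ===== SOURCE A (Python) =====
-- def LargeSmallSum(arr):
--     firstlarge =-999999999
--     secondlarge = firstlarge
--     firstsmall = 999999999
--     secondsmall = firstsmall
--     n=len(arr)
--     for i in range(n):
--         if i%2==0:
--             if firstlarge<arr[i]:
--                 secondlarge=firstlarge
--                 firstlarge=arr[i]
--             if(firstlarge>arr[i] and secondlarge<arr[i]):
--                 secondlarge=arr[i]
--         else:
--             if(firstsmall>arr[i]):
--                 secondsmall= firstsmall
--                 firstsmall=arr[i]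
--             if(firstsmall<arr[i] and secondsmall>arr[i]):
--                 secondsmall=arr[i]
--
--
--
--     return secondlarge+secondsmall
-- ===== SOURCE B (Python) =====
-- def LargeSmallSum(arr):
--     evens = arr[0::2]
--     odds = arr[1::2]
--     big = max([-999999999] + evens)
--     secondlarge = max([-999999999] + [x for x in evens if x < big])
--     small = min([999999999] + odds)
--     secondsmall = min([999999999] + [x for x in odds if x > small])
--     return secondlarge + secondsmall
-- ===== Notes on version B (the rewrite author's own statement) =====
-- stated objective: simpler
-- what changed: Replaces A's single four-accumulator state-machine loop with a direct decomposition: split the list into even- and odd-indexed sublists, take the running max/min, and take the max/min of the elements strictly below/above it, each seeded with A's sentinel.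
import Mathlib
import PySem

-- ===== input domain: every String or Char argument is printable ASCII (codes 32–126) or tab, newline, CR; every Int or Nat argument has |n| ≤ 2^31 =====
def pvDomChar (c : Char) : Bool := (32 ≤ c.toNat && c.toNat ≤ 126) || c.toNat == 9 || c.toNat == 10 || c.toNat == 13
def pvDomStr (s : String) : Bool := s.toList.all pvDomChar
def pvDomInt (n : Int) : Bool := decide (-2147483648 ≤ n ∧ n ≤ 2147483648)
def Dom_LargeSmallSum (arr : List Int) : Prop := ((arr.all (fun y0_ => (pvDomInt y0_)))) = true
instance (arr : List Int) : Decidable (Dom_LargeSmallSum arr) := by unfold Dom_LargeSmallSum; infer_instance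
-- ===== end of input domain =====

-- B replaces A's four-accumulator state machine by a plain split/max/filter decomposition; same return value, no speed claim.

-- ===== PORT A =====
-- the even-index branch of A's loop body (two sequential if-updates on (firstlarge, secondlarge))
def pvStepEven (p : Int × Int) (x : Int) : Int × Int :=
  let p := if p.1 < x then (x, p.1) else p
  if p.1 > x && p.2 < x then (p.1, x) else p

-- the odd-index branch of A's loop body (two sequential if-updates on (firstsmall, secondsmall))
def pvStepOdd (p : Int × Int) (x : Int) : Int × Int :=
  let p := if p.1 > x then (x, p.1) else p
  if p.1 < x && p.2 > x then (p.1, x) else p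

def LargeSmallSum (arr : List Int) : Int :=
  let n := PySem.List.len arr
  let st := (PySem.List.pyRange 0 n 1).foldl
    (fun (st : (Int × Int) × (Int × Int)) i =>
      if PySem.Int.mod i 2 == 0 then (pvStepEven st.1 (PySem.List.pyGetD arr i 0), st.2)
      else (st.1, pvStepOdd st.2 (PySem.List.pyGetD arr i 0)))
    ((-999999999, -999999999), (999999999, 999999999))
  st.1.2 + st.2.2

-- ===== PORT B =====
-- max([-999999999] + l) / min([999999999] + l) are ported as the running fold, per PySem.List.max?_id_cons / min?_id_cons
def LargeSmallSum_alt (arr : List Int) : Int :=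
  let evens := ((PySem.List.enumerate arr 0).filter (fun p => PySem.Int.mod p.1 2 == 0)).map (fun p => p.2)
  let odds := ((PySem.List.enumerate arr 0).filter (fun p => PySem.Int.mod p.1 2 == 1)).map (fun p => p.2)
  let big := evens.foldl max (-999999999)
  let secondlarge := (evens.filter (fun x => x < big)).foldl max (-999999999)
  let small := odds.foldl min (999999999)
  let secondsmall := (odds.filter (fun x => x > small)).foldl min (999999999)
  secondlarge + secondsmall

-- ===== PRECONDITION & SPEC =====
def Spec_LargeSmallSum (arr : List Int) (out : Int) : Prop := out = LargeSmallSum_alt arr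
instance (arr : List Int) (out : Int) : Decidable (Spec_LargeSmallSum arr out) := by unfold Spec_LargeSmallSum; infer_instance

-- ===== CLAIM (what is proved, stated in full; the proofs are below) =====
def Claim_equal_LargeSmallSum : Prop := ∀ (arr : List Int), Dom_LargeSmallSum arr → Spec_LargeSmallSum arr (LargeSmallSum arr)

-- ===== LEMMAS AND PROOFS =====

-- A's even-branch step, written as one conditional
theorem pvStepEven_eq (F S x : Int) :
    pvStepEven (F, S) x = if F < x then (x, F) else (F, if S < x ∧ x < F then x else S) := by
  unfold pvStepEven
  split_ifs <;> simp_all <;> omega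

-- A's odd-branch step, written as one conditional
theorem pvStepOdd_eq (F S x : Int) :
    pvStepOdd (F, S) x = if x < F then (x, F) else (F, if x < S ∧ F < x then x else S) := by
  unfold pvStepOdd
  split_ifs <;> simp_all <;> omega

-- A's even-branch fold computes the running max and the max of the elements strictly below it
theorem pvEvenFold (xs : List Int) (f s : Int) (h : s ≤ f) :
    List.foldl pvStepEven (f, s) xs
      = (xs.foldl max f,
         ((f :: xs).filter (fun x => x < xs.foldl max f)).foldl max s) := by
  induction xs using List.reverseRecOn with
  | nil => simp
  | append_singleton t x ih =>
    rw [List.foldl_append, List.foldl_append, ih, List.foldl_cons, List.foldl_nil,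
      pvStepEven_eq]
    have hF := PySem.List.le_foldl_max t f
    set F := t.foldl max f with hFdef
    simp only [List.foldl_cons, List.foldl_nil]
    by_cases hx : F < x
    · have hmax : max F x = x := by omega
      have hfilt : (f :: (t ++ [x])).filter (fun y => decide (y < x)) = f :: t := by
        rw [show f :: (t ++ [x]) = (f :: t) ++ [x] by simp, List.filter_append]
        rw [List.filter_eq_self.mpr ?_, List.filter_singleton]
        · simp
        · intro y hy
          rcases List.mem_cons.mp hy with rfl | hy
          · simp; omega
          · have := hF.2 y hy; simp; omega
      have h2 : (f :: t).foldl max s = F := by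
        rw [List.foldl_cons, show max s f = f by omega]
      rw [if_pos hx]
      simp only [hmax, hfilt, h2]
    · have hmax : max F x = F := by omega
      rw [if_neg hx]
      simp only [hmax]
      rw [show f :: (t ++ [x]) = (f :: t) ++ [x] by simp, List.filter_append,
        List.foldl_append]
      set S := ((f :: t).filter (fun y => decide (y < F))).foldl max s with hS
      by_cases hxF : x < F
      · rw [show [x].filter (fun y => decide (y < F)) = [x] by simp [hxF]]
        simp only [List.foldl_cons, List.foldl_nil]
        congr 1
        split_ifs <;> omega
      · rw [show [x].filter (fun y => decide (y < F)) = [] by simp; omega, List.foldl_nil]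
        congr 1
        rw [if_neg (by tauto)]

-- dual: A's odd-branch fold computes the running min and the min of the elements strictly above it
theorem pvOddFold (xs : List Int) (f s : Int) (h : f ≤ s) :
    List.foldl pvStepOdd (f, s) xs
      = (xs.foldl min f,
         ((f :: xs).filter (fun x => xs.foldl min f < x)).foldl min s) := by
  induction xs using List.reverseRecOn with
  | nil => simp
  | append_singleton t x ih =>
    rw [List.foldl_append, List.foldl_append, ih, List.foldl_cons, List.foldl_nil,
      pvStepOdd_eq]
    have hF := PySem.List.foldl_min_le t f
    set F := t.foldl min f with hFdef
    simp only [List.foldl_cons, List.foldl_nil]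
    by_cases hx : x < F
    · have hmin : min F x = x := by omega
      have hfilt : (f :: (t ++ [x])).filter (fun y => decide (x < y)) = f :: t := by
        rw [show f :: (t ++ [x]) = (f :: t) ++ [x] by simp, List.filter_append]
        rw [List.filter_eq_self.mpr ?_, List.filter_singleton]
        · simp
        · intro y hy
          rcases List.mem_cons.mp hy with rfl | hy
          · simp; omega
          · have := hF.2 y hy; simp; omega
      have h2 : (f :: t).foldl min s = F := by
        rw [List.foldl_cons, show min s f = f by omega]
      rw [if_pos hx]
      simp only [hmin, hfilt, h2]
    · have hmin : min F x = F := by omega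
      rw [if_neg hx]
      simp only [hmin]
      rw [show f :: (t ++ [x]) = (f :: t) ++ [x] by simp, List.filter_append,
        List.foldl_append]
      set S := ((f :: t).filter (fun y => decide (F < y))).foldl min s with hS
      by_cases hxF : F < x
      · rw [show [x].filter (fun y => decide (F < y)) = [x] by simp [hxF]]
        simp only [List.foldl_cons, List.foldl_nil]
        congr 1
        split_ifs <;> omega
      · rw [show [x].filter (fun y => decide (F < y)) = [] by simp; omega, List.foldl_nil]
        congr 1
        rw [if_neg (by tauto)]

-- the loop over enumerated elements splits into the two independent branch folds
theorem pvSplitFold (l : List Int) (k : Int) (st : (Int × Int) × (Int × Int)) :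
    List.foldl
      (fun (st : (Int × Int) × (Int × Int)) (q : Int × Int) =>
        if PySem.Int.mod q.1 2 == 0 then (pvStepEven st.1 q.2, st.2)
        else (st.1, pvStepOdd st.2 q.2))
      st (PySem.List.enumerate l k)
      = (List.foldl pvStepEven st.1
           (((PySem.List.enumerate l k).filter (fun p => PySem.Int.mod p.1 2 == 0)).map (fun p => p.2)),
         List.foldl pvStepOdd st.2
           (((PySem.List.enumerate l k).filter (fun p => PySem.Int.mod p.1 2 == 1)).map (fun p => p.2))) := by
  induction l generalizing k st with
  | nil => simp [PySem.List.enumerate_nil]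
  | cons y l ih =>
    rw [PySem.List.enumerate_cons]
    rcases PySem.Int.mod_two_eq k with hk | hk <;>
      simp only [List.foldl_cons, List.filter_cons, hk] <;>
      simp only [show ((0 : Int) == 1) = false by decide, show ((1 : Int) == 0) = false by decide,
        show ((0 : Int) == 0) = true by decide, show ((1 : Int) == 1) = true by decide,
        if_true, if_false, Bool.false_eq_true] <;>
      exact ih (k + 1) _

-- the pyRange-over-indices loop of A is the fold over the enumerated list
theorem pvLoopEq (arr : List Int) (st : (Int × Int) × (Int × Int)) :
    (PySem.List.pyRange 0 (PySem.List.len arr) 1).foldl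
      (fun (st : (Int × Int) × (Int × Int)) i =>
        if PySem.Int.mod i 2 == 0 then (pvStepEven st.1 (PySem.List.pyGetD arr i 0), st.2)
        else (st.1, pvStepOdd st.2 (PySem.List.pyGetD arr i 0)))
      st
      = List.foldl
          (fun (st : (Int × Int) × (Int × Int)) (q : Int × Int) =>
            if PySem.Int.mod q.1 2 == 0 then (pvStepEven st.1 q.2, st.2)
            else (st.1, pvStepOdd st.2 q.2))
          st (PySem.List.enumerate arr 0) := by
  rw [PySem.List.enumerate_eq_map_pyRange (d := 0), List.foldl_map]

theorem pvHeadAbsorbMax (a : Int) (l : List Int) (p : Int → Bool) :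
    ((a :: l).filter p).foldl max a = (l.filter p).foldl max a := by
  by_cases hp : p a = true <;> simp [hp]

theorem pvHeadAbsorbMin (a : Int) (l : List Int) (p : Int → Bool) :
    ((a :: l).filter p).foldl min a = (l.filter p).foldl min a := by
  by_cases hp : p a = true <;> simp [hp]

-- ===== VERDICT (by name: the statement is the Claim_ definition above) =====
theorem LargeSmallSum_spec : Claim_equal_LargeSmallSum := by
  intro arr _
  show LargeSmallSum arr = LargeSmallSum_alt arr
  simp only [LargeSmallSum, LargeSmallSum_alt]
  rw [pvLoopEq, pvSplitFold,
    pvEvenFold _ _ _ (le_refl _), pvOddFold _ _ _ (le_refl _),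
    pvHeadAbsorbMax, pvHeadAbsorbMin]
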